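-- pv_equiv track=rewrite | github.com/ZZL0897/RPH-Counter | tools/split_sample.py | get_split_4_rect
-- ===== SOURCE A (Python) =====
-- def get_split_4_rect(raw_size=(1728, 2304)):
--     rectangles = []
--     for i in range(4):
--         left_top_x = int(raw_size[0] * (i % 2) / 2)
--         left_top_y = int(raw_size[1] * (i // 2) / 2)
--         right_bottom_x = int(raw_size[0] * (i % 2 + 1) / 2)
--         right_bottom_y = int(raw_size[1] * (i // 2 + 1) / 2)
--         rectangles.append([left_top_x, left_top_y, right_bottom_x, right_bottom_y])
--     return rectangles
-- ===== SOURCE B (Python) =====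
-- def get_split_4_rect(raw_size=(1728, 2304)):
--     w, h = raw_size
--     mx, my = int(w / 2), int(h / 2)
--     return [[0, 0, mx, my],
--             [mx, 0, w, my],
--             [0, my, mx, h],
--             [mx, my, w, h]]
-- ===== Notes on version B (the rewrite author's own statement) =====
-- stated objective: simpler
-- what changed: Replace the loop over quadrant indices with a closed form: compute the two midpoints once and return the four rectangles as one literal list, observing that int(size*0/2)=0, int(size*2/2)=size and int(size*1/2) is the truncated midpoint.
import Mathlib
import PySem

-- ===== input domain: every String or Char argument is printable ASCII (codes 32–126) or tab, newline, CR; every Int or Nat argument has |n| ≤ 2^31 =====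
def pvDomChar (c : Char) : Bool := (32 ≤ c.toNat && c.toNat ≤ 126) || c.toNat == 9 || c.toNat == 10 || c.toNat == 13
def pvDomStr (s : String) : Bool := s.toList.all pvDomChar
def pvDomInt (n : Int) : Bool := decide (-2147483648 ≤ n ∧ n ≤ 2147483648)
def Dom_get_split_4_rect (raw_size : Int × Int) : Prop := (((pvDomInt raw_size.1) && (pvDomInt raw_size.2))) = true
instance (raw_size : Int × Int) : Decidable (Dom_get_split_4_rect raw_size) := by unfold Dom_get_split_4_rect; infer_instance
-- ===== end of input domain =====

-- B replaces the index loop by a closed form: compute the two midpoints once and return the four rectangles literally (simpler, same cost).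
-- int(n*k/2): on |n| ≤ 2^31 the float product and halving are exact, so int() truncates toward zero = Int.tdiv (ported by hand, exact on Dom).

-- ===== PORT A =====
def get_split_4_rect (raw_size : Int × Int) : List (List Int) :=
  (PySem.List.pyRange 0 4 1).foldl (fun rectangles i =>
    let left_top_x := (raw_size.1 * (PySem.Int.mod i 2)).tdiv 2
    let left_top_y := (raw_size.2 * (PySem.Int.floordiv i 2)).tdiv 2
    let right_bottom_x := (raw_size.1 * (PySem.Int.mod i 2 + 1)).tdiv 2
    let right_bottom_y := (raw_size.2 * (PySem.Int.floordiv i 2 + 1)).tdiv 2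
    rectangles ++ [[left_top_x, left_top_y, right_bottom_x, right_bottom_y]]) []

-- ===== PORT B =====
def get_split_4_rect_alt (raw_size : Int × Int) : List (List Int) :=
  let w := raw_size.1
  let h := raw_size.2
  let mx := w.tdiv 2
  let my := h.tdiv 2
  [[0, 0, mx, my], [mx, 0, w, my], [0, my, mx, h], [mx, my, w, h]]

-- ===== PRECONDITION & SPEC =====
def Spec_get_split_4_rect (raw_size : Int × Int) (out : List (List Int)) : Prop := out = get_split_4_rect_alt raw_size
instance (raw_size : Int × Int) (out : List (List Int)) : Decidable (Spec_get_split_4_rect raw_size out) := by unfold Spec_get_split_4_rect; infer_instance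

-- ===== CLAIM (what is proved, stated in full; the proofs are below) =====
def Claim_equal_get_split_4_rect : Prop := ∀ (raw_size : Int × Int), Dom_get_split_4_rect raw_size → Spec_get_split_4_rect raw_size (get_split_4_rect raw_size)

-- ===== LEMMAS AND PROOFS =====

-- ===== VERDICT (by name: the statement is the Claim_ definition above) =====
theorem get_split_4_rect_spec : Claim_equal_get_split_4_rect := by
  intro ⟨w, h⟩ _
  show get_split_4_rect (w, h) = get_split_4_rect_alt (w, h)
  simp [get_split_4_rect, get_split_4_rect_alt, PySem.List.pyRange, PySem.Int.mod,
        PySem.Int.floordiv, List.range_succ, Int.mul_tdiv_cancel]
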